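-- pv_equiv track=rewrite | github.com/RusbehAbtahi/RAGstream | ragstream/orchestration/superprompt_projector.py | _sanitize_chunk_text
-- ===== SOURCE A (Python) =====
-- from typing import Any, Dict, List, TYPE_CHECKING
--
-- def _sanitize_chunk_text(text: str) -> str:
--     """
--     Prevent source Markdown headings from becoming real prompt headings.
--     """
--     if not text:
--         return ""
--
--     sanitized_lines: List[str] = []
--
--     for line in text.splitlines():
--         stripped = line.lstrip()
--         indent = line[: len(line) - len(stripped)]
--
--         if stripped.startswith("### "):
--             sanitized_lines.append(f"{indent}[H3] {stripped[4:].strip()}")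
--         elif stripped.startswith("## "):
--             sanitized_lines.append(f"{indent}[H2] {stripped[3:].strip()}")
--         elif stripped.startswith("# "):
--             sanitized_lines.append(f"{indent}[H1] {stripped[2:].strip()}")
--         else:
--             sanitized_lines.append(line)
--
--     return "\n".join(sanitized_lines).strip()
-- ===== SOURCE B (Python) =====
-- def _sanitize_chunk_text(text: str) -> str:
--     # Single character-level scan: extract each line by hand (splitting on
--     # \r\n / \r / \n), rewrite a 1-3 hash heading in place, and emit the
--     # result incrementally with explicit '\n' separators; strip at the end.
--     out = []
--     i, n = 0, len(text)
--     while i < n: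
--         j = i
--         while j < n and text[j] not in "\r\n":
--             j += 1
--         line = text[i:j]
--         k = 0
--         while k < len(line) and line[k].isspace():
--             k += 1
--         h = k
--         while h < len(line) and line[h] == '#':
--             h += 1
--         m = h - k
--         if 1 <= m <= 3 and h < len(line) and line[h] == ' ':
--             out.append(line[:k] + "[H%d] " % m + line[h + 1:].strip())
--         else:
--             out.append(line)
--         if j < n:
--             if text[j] == '\r' and j + 1 < n and text[j + 1] == '\n':
--                 j += 2
--             else:
--                 j += 1
--             if j < n:
--                 out.append("\n")
--         i = j
--     return "".join(out).strip()
-- ===== Notes on version B (the rewrite author's own statement) =====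
-- stated objective: alternative
-- what changed: A splits the text with str.splitlines, rewrites each line through a three-branch startswith ladder and joins with a newline; B never calls splitlines or join: it is one hand-written character-level scan that finds each line terminator itself (CRLF, CR or LF), counts the leading hash run after the indent to classify a heading in a single computation, and emits the rewritten text incrementally.
import Mathlib
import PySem

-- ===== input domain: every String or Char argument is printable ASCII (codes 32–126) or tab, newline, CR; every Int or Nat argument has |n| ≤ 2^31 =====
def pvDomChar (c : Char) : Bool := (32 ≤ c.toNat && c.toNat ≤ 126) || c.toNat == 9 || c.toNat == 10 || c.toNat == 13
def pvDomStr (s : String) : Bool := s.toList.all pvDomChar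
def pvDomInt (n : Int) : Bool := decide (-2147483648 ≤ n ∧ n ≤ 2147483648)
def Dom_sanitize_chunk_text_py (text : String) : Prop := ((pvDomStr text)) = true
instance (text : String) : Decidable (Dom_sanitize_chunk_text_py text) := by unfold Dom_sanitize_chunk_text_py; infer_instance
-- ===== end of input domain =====

-- B replaces A's splitlines/per-line-ladder/join pipeline by one hand-written character-level
-- scan that extracts lines itself and emits the rewritten text incrementally (alternative, same cost).

-- ===== PORT A =====
-- the body of A's for-loop (ladder of startswith branches), on code points
def pvALine (line : List Char) : List Char :=
  let stripped := PySem.Chars.lstrip line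
  let indent := PySem.List.slice line none (some ((line.length : Int) - (stripped.length : Int)))
  if PySem.Chars.startswith stripped "### ".toList then
    indent ++ "[H3] ".toList ++ PySem.Chars.strip (PySem.List.slice stripped (some 4) none)
  else if PySem.Chars.startswith stripped "## ".toList then
    indent ++ "[H2] ".toList ++ PySem.Chars.strip (PySem.List.slice stripped (some 3) none)
  else if PySem.Chars.startswith stripped "# ".toList then
    indent ++ "[H1] ".toList ++ PySem.Chars.strip (PySem.List.slice stripped (some 2) none)
  else line

def sanitize_chunk_text_py (text : String) : String :=
  if text = "" then ""
  else
    let sanitized := (PySem.Chars.splitlines text.toList).foldl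
      (fun acc line => acc ++ [pvALine line]) ([] : List (List Char))
    String.ofList (PySem.Chars.strip (PySem.Chars.join ['\n'] sanitized))

-- ===== PORT B =====
-- Source B's per-line rewrite: the three index-advancing while-loops are ported as
-- takeWhile/dropWhile over the same predicates (line[:k] is the isspace-prefix,
-- m the following '#'-count), exact for those scanning loops.
def pvFix (line : List Char) : List Char :=
  let pre := line.takeWhile PySem.Chars.isspace
  let body := line.dropWhile PySem.Chars.isspace
  let m := (body.takeWhile (fun c => c = '#')).length
  if 1 ≤ m ∧ m ≤ 3 ∧ (body.drop m).head? = some ' ' then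
    pre ++ "[H".toList ++ PySem.Int.toChars (m : Int) ++ "] ".toList
      ++ PySem.Chars.strip (body.drop (m + 1))
  else line

-- Source B's inner "find end of line, then consume \r\n / \r / \n" scan, by hand (exact):
-- returns the line and, when a terminator was found, the text after it.
def pvTakeLine : List Char → List Char × Option (List Char)
  | [] => ([], none)
  | c :: t =>
    if c = '\n' then ([], some t)
    else if c = '\r' then
      match t with
      | '\n' :: t' => ([], some t')
      | _ => ([], some t)
    else
      let (l, r) := pvTakeLine t
      (c :: l, r)

theorem pvTakeLine_rest_length : ∀ (s r : List Char), (pvTakeLine s).2 = some r → r.length < s.length := by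
  intro s
  induction s with
  | nil => intro r hr; simp [pvTakeLine] at hr
  | cons c t ih =>
    intro r h
    by_cases h1 : c = '\n'
    · simp [pvTakeLine, h1] at h; subst h; simp
    by_cases h2 : c = '\r'
    · subst h2
      rcases t with _ | ⟨c', t'⟩
      · simp [pvTakeLine] at h; subst h; simp
      · by_cases h3 : c' = '\n'
        · subst h3; simp [pvTakeLine] at h; subst h; simp
        · simp [pvTakeLine, h3] at h; subst h; simp
    · simp [pvTakeLine, h1, h2] at h
      have := ih r h
      simp; omega


-- Source B's outer while-loop: take a line, rewrite it, append '\n' unless the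
-- (consumed) terminator ended the text; then strip.
def pvScan (s : List Char) : List Char :=
  match _hTL : pvTakeLine s with
  | (l, none) => pvFix l
  | (l, some r) =>
    if r = [] then pvFix l
    else pvFix l ++ '\n' :: pvScan r
termination_by s.length
decreasing_by exact pvTakeLine_rest_length s r (by rw [_hTL])

def sanitize_chunk_text_py_alt (text : String) : String :=
  String.ofList (PySem.Chars.strip (pvScan text.toList))

-- ===== PRECONDITION & SPEC =====
def Spec_sanitize_chunk_text_py (text : String) (out : String) : Prop := out = sanitize_chunk_text_py_alt text
instance (text : String) (out : String) : Decidable (Spec_sanitize_chunk_text_py text out) := by unfold Spec_sanitize_chunk_text_py; infer_instance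

-- ===== CLAIM (what is proved, stated in full; the proofs are below) =====
def Claim_equal_sanitize_chunk_text_py : Prop := ∀ (text : String), Dom_sanitize_chunk_text_py text → Spec_sanitize_chunk_text_py text (sanitize_chunk_text_py text)

-- ===== LEMMAS AND PROOFS =====

def pvLines (s : List Char) : List (List Char) :=
  match _hTL : pvTakeLine s with
  | (l, none) => if l = [] then [] else [l]
  | (l, some r) => l :: pvLines r
termination_by s.length
decreasing_by exact pvTakeLine_rest_length s r (by rw [_hTL])

theorem pvLines_eq (s : List Char) : pvLines s =
    match pvTakeLine s with
    | (l, none) => if l = [] then [] else [l]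
    | (l, some r) => l :: pvLines r := by
  conv_lhs => rw [pvLines]
  rcases pvTakeLine s with ⟨l, _ | r⟩ <;> simp

theorem pvLines_nil : pvLines [] = [] := by
  rw [pvLines_eq]; simp [pvTakeLine]

theorem pv_char_eq_of_toNat {c d : Char} (h : c.toNat = d.toNat) : c = d :=
  Char.ext (UInt32.toNat_inj.mp h)

theorem pv_go_spec (isB : Char → Bool)
    (hB : ∀ c, pvDomChar c = true → isB c = (c.toNat == 10 || c.toNat == 13)) :
    ∀ (n : Nat) (s : List Char), s.length ≤ n → s.all pvDomChar = true →
    ∀ (cur : List Char) (acc : List (List Char)),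
    PySem.Chars.splitlines.go isB s cur acc =
      acc.reverse ++ (match pvTakeLine s with
        | (l, none) => if cur.reverse ++ l = [] then [] else [cur.reverse ++ l]
        | (l, some r) => (cur.reverse ++ l) :: pvLines r) := by
  intro n
  induction n with
  | zero =>
    intro s hs _ cur acc
    have : s = [] := by cases s <;> simp_all
    subst this
    rw [PySem.Chars.splitlines.go.eq_1]
    simp [pvTakeLine, List.isEmpty_iff]
    rcases cur with _ | ⟨c, cur⟩ <;> simp
  | succ n ih =>
    intro s hs hDom cur acc
    rcases s with _ | ⟨c, rest⟩
    · rw [PySem.Chars.splitlines.go.eq_1]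
      simp [pvTakeLine, List.isEmpty_iff]
      rcases cur with _ | ⟨c, cur⟩ <;> simp
    · simp only [List.all_cons, Bool.and_eq_true] at hDom
      obtain ⟨hdc, hdr⟩ := hDom
      simp only [List.length_cons, Nat.add_le_add_iff_right] at hs
      have key : ∀ (t : List Char), t.length ≤ n → t.all pvDomChar = true →
          PySem.Chars.splitlines.go isB t [] (cur.reverse :: acc) =
            acc.reverse ++ cur.reverse :: pvLines t := by
        intro t h1 h2
        rw [ih t h1 h2 [] (cur.reverse :: acc), pvLines_eq t]
        rcases pvTakeLine t with ⟨l, _ | r''⟩ <;> simp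
      by_cases hcr : c = '\r'
      · subst hcr
        rcases rest with _ | ⟨c', r'⟩
        · rw [PySem.Chars.splitlines.go.eq_3 _ _ _ _ _ (by rintro r _ h; simp at h)]
          rw [hB _ hdc, if_pos (by decide)]
          rw [key [] (by simp) (by simp)]
          simp [pvTakeLine, pvLines_nil]
        · by_cases hn : c' = '\n'
          · subst hn
            rw [PySem.Chars.splitlines.go.eq_2]
            simp only [List.all_cons, Bool.and_eq_true] at hdr
            rw [key r' (by simp at hs; omega) hdr.2]
            have hTL : pvTakeLine ('\r' :: '\n' :: r') = ([], some r') := by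
              simp [pvTakeLine]
            simp [hTL]
          · rw [PySem.Chars.splitlines.go.eq_3 _ _ _ _ _
                (by rintro r _ h; injection h with h1 _; exact hn h1)]
            rw [hB _ hdc, if_pos (by decide)]
            rw [key (c' :: r') hs hdr]
            have hTL : pvTakeLine ('\r' :: c' :: r') = ([], some (c' :: r')) := by
              simp [pvTakeLine, hn]
            simp [hTL]
      · by_cases hc10 : c.toNat = 10
        · have hcn : c = '\n' := pv_char_eq_of_toNat hc10
          subst hcn
          rw [PySem.Chars.splitlines.go.eq_3 _ _ _ _ _ (by rintro r h _; exact hcr h)]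
          rw [hB _ hdc, if_pos (by decide)]
          rw [key rest hs hdr]
          have hTL : pvTakeLine ('\n' :: rest) = ([], some rest) := by
            simp [pvTakeLine]
          simp [hTL]
        · have hc13 : c.toNat ≠ 13 := fun h => hcr (pv_char_eq_of_toNat h)
          have hcn : c ≠ '\n' := fun h => hc10 (by rw [h]; rfl)
          rw [PySem.Chars.splitlines.go.eq_3 _ _ _ _ _ (by rintro r h _; exact hcr h)]
          rw [hB _ hdc, if_neg (by simp [hc10, hc13])]
          rw [ih rest hs hdr (c :: cur) acc]
          rcases hr : pvTakeLine rest with ⟨l, o⟩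
          have hTL : pvTakeLine (c :: rest) = (c :: l, o) := by
            simp [pvTakeLine, hcn, hcr, hr]
          rcases o with _ | r'' <;> simp [hTL]

theorem pv_splitlines_eq_pvLines (s : List Char) (hDom : s.all pvDomChar = true) :
    PySem.Chars.splitlines s = pvLines s := by
  unfold PySem.Chars.splitlines
  rw [pv_go_spec _ ?hB s.length s le_rfl hDom [] []]
  case hB =>
    intro c hc
    simp only [pvDomChar, Bool.or_eq_true, Bool.and_eq_true, decide_eq_true_eq, beq_iff_eq] at hc
    apply Bool.eq_iff_iff.mpr
    simp only [Bool.or_eq_true, decide_eq_true_eq, beq_iff_eq]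
    omega
  rw [pvLines_eq s]
  rcases pvTakeLine s with ⟨l, _ | r⟩ <;> simp

theorem pvTakeLine_none (s : List Char) (h : (pvTakeLine s).2 = none) : (pvTakeLine s).1 = s := by
  induction s with
  | nil => simp [pvTakeLine]
  | cons c t ih =>
    by_cases h1 : c = '\n'
    · simp [pvTakeLine, h1] at h
    by_cases h2 : c = '\r'
    · subst h2
      rcases t with _ | ⟨c', t'⟩
      · simp [pvTakeLine] at h
      · by_cases h3 : c' = '\n' <;> simp [pvTakeLine, h3] at h
    · simp [pvTakeLine, h1, h2] at h ⊢
      exact ih h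

theorem pvLines_ne_nil (s : List Char) (h : s ≠ []) : pvLines s ≠ [] := by
  rw [pvLines_eq s]
  rcases hr : pvTakeLine s with ⟨l, _ | r⟩
  · have : l = s := by have := pvTakeLine_none s (by rw [hr]); rwa [hr] at this
    subst this
    simp [h]
  · simp

theorem pvFix_nil : pvFix [] = [] := by simp [pvFix]

theorem pvScan_eq_join : ∀ (n : Nat) (s : List Char), s.length ≤ n →
    pvScan s = PySem.Chars.join ['\n'] ((pvLines s).map pvFix) := by
  intro n
  induction n with
  | zero =>
    intro s hs
    have : s = [] := by cases s <;> simp_all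
    subst this
    conv_lhs => rw [pvScan]
    simp [pvTakeLine, pvLines_nil, pvFix_nil, PySem.Chars.join]
    rfl
  | succ n ih =>
    intro s hs
    conv_lhs => rw [pvScan]
    rw [pvLines_eq s]
    rcases hr : pvTakeLine s with ⟨l, _ | r⟩
    · simp only
      by_cases hl : l = []
      · subst hl; simp [pvFix_nil, PySem.Chars.join]; rfl
      · simp [hl, PySem.Chars.join_singleton]
    · have hlen : r.length < s.length := pvTakeLine_rest_length s r (by rw [hr])
      by_cases hre : r = []
      · subst hre
        simp [pvLines_nil, PySem.Chars.join_singleton]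
      · simp only [if_neg hre, List.map_cons]
        rw [ih r (by omega)]
        obtain ⟨m, ms, hm⟩ : ∃ m ms, (pvLines r).map pvFix = m :: ms := by
          rcases hpl : pvLines r with _ | ⟨m, ms⟩
          · exact absurd hpl (pvLines_ne_nil r hre)
          · exact ⟨pvFix m, ms.map pvFix, by simp⟩
        rw [hm, PySem.Chars.join_cons_cons]
        simp

theorem pv_drop2 (a b : Char) (s : List Char) :
    PySem.List.slice (a :: b :: s) (some 2) none = s := by
  simpa using PySem.List.slice_from_natCast (a :: b :: s) 2

theorem pv_drop3 (a b c : Char) (s : List Char) :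
    PySem.List.slice (a :: b :: c :: s) (some 3) none = s := by
  simpa using PySem.List.slice_from_natCast (a :: b :: c :: s) 3

theorem pv_drop4 (a b c d : Char) (s : List Char) :
    PySem.List.slice (a :: b :: c :: d :: s) (some 4) none = s := by
  simpa using PySem.List.slice_from_natCast (a :: b :: c :: d :: s) 4

theorem pv_toChars1 : PySem.Int.toChars 1 = ['1'] := by decide
theorem pv_toChars2 : PySem.Int.toChars 2 = ['2'] := by decide
theorem pv_toChars3 : PySem.Int.toChars 3 = ['3'] := by decide

theorem pvALine_eq_pvFix (line : List Char) : pvALine line = pvFix line := by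
  simp only [pvALine, pvFix]
  have hlen : (line.takeWhile PySem.Chars.isspace).length
      + (line.dropWhile PySem.Chars.isspace).length = line.length := by
    rw [← List.length_append, List.takeWhile_append_dropWhile]
  have hind : PySem.List.slice line none
      (some ((line.length : Int) - ((PySem.Chars.lstrip line).length : Int)))
      = line.takeWhile PySem.Chars.isspace := by
    have h1 : (line.length : Int) - ((PySem.Chars.lstrip line).length : Int)
        = ((line.takeWhile PySem.Chars.isspace).length : Int) := by
      simp only [PySem.Chars.lstrip]; omega
    rw [h1, PySem.List.slice_to_natCast]
    exact (List.prefix_iff_eq_take.mp (List.takeWhile_prefix _)).symm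
  rw [hind]
  show _ = _
  simp only [PySem.Chars.lstrip]
  generalize line.takeWhile PySem.Chars.isspace = pre
  generalize line.dropWhile PySem.Chars.isspace = s
  rcases s with _ | ⟨c1, s⟩
  · simp [PySem.Chars.startswith_iff]
  by_cases h1 : c1 = '#'
  case neg =>
    simp [PySem.Chars.startswith_iff, List.cons_prefix_cons, h1, Ne.symm h1]
  subst h1
  rcases s with _ | ⟨c2, s⟩
  · simp [PySem.Chars.startswith_iff, List.cons_prefix_cons]
  by_cases h2 : c2 = '#'
  case neg =>
    by_cases hs2 : c2 = ' '
    · subst hs2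
      simp [PySem.Chars.startswith_iff, List.cons_prefix_cons, h2, Ne.symm h2,
        pv_drop2, pv_toChars1]
    · simp [PySem.Chars.startswith_iff, List.cons_prefix_cons, h2, Ne.symm h2,
        hs2, Ne.symm hs2]
  subst h2
  rcases s with _ | ⟨c3, s⟩
  · simp [PySem.Chars.startswith_iff, List.cons_prefix_cons]
  by_cases h3 : c3 = '#'
  case neg =>
    by_cases hs3 : c3 = ' '
    · subst hs3
      simp [PySem.Chars.startswith_iff, List.cons_prefix_cons, h3, Ne.symm h3,
        pv_drop3, pv_toChars2]
    · simp [PySem.Chars.startswith_iff, List.cons_prefix_cons, h3, Ne.symm h3,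
        hs3, Ne.symm hs3]
  subst h3
  rcases s with _ | ⟨c4, s⟩
  · simp [PySem.Chars.startswith_iff, List.cons_prefix_cons]
  by_cases h4 : c4 = '#'
  case pos =>
    subst h4
    simp only [PySem.Chars.startswith_iff]
    simp
  by_cases hs4 : c4 = ' '
  · subst hs4
    simp [PySem.Chars.startswith_iff, List.cons_prefix_cons, h4,
      pv_drop4, pv_toChars3]
  · simp [PySem.Chars.startswith_iff, List.cons_prefix_cons, h4,
      hs4, Ne.symm hs4]

theorem pvScan_nil : pvScan [] = [] := by
  conv_lhs => rw [pvScan]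
  simp [pvTakeLine, pvFix_nil]

-- ===== VERDICT (by name: the statement is the Claim_ definition above) =====
theorem sanitize_chunk_text_py_spec : Claim_equal_sanitize_chunk_text_py := by
  intro text hDom
  unfold Spec_sanitize_chunk_text_py sanitize_chunk_text_py sanitize_chunk_text_py_alt
  by_cases h : text = ""
  · subst h
    rw [if_pos rfl]
    have h0 : ("" : String).toList = [] := rfl
    rw [h0, pvScan_nil]
    rfl
  · rw [if_neg h]
    simp only
    rw [PySem.List.foldl_append_singleton_eq_map]
    have hDom' : text.toList.all pvDomChar = true := hDom
    rw [pv_splitlines_eq_pvLines _ hDom',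
        pvScan_eq_join text.toList.length text.toList le_rfl]
    rw [List.map_congr_left (fun l _ => pvALine_eq_pvFix l)]
    simp
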